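-- pv_equiv track=rewrite | github.com/PinewoodRobotics/B.L.I.T.Z | backend/deployment/compilation/util/parsing.py | parse_output_flags
-- ===== SOURCE A (Python) =====
-- def parse_output_flags(output: str, expected_flags: list[str]) -> dict[str, str]:
--     """
--     Parse the output of a command and return a dictionary of flags and their values.
--
--     Args:
--         output: The output of the command to parse.
--         expected_flags: A list of flags to expect in the output.
--
--     Returns:
--         A dictionary of flags and their values.
--
--     Example:
--     output:
--       LINUX_DISTRO=ubuntu-22_04
--       C_LIB_VERSION=2.35
--       RESULT_PATH=/work/build/release/2.35/ubuntu-22_04/rust/test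
--     expected_flags: ["LINUX_DISTRO", "C_LIB_VERSION", "RESULT_PATH"]
--     returns:
--       {
--         "LINUX_DISTRO": "ubuntu-22_04",
--         "C_LIB_VERSION": "2.35",
--         "RESULT_PATH": "/work/build/release/2.35/ubuntu-22_04/rust/test"
--       }
--     """
--     flags = {}
--     for line in output.splitlines():
--         for flag in expected_flags:
--             if line.startswith(flag + "="):
--                 flags[flag] = line.removeprefix(flag + "=")
--                 break
--     return flags
-- ===== SOURCE B (Python) =====
-- def parse_output_flags(output: str, expected_flags: list[str]) -> dict[str, str]:
--     wanted = set(expected_flags)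
--     flags = {}
--     for line in output.splitlines():
--         key, sep, value = line.partition("=")
--         if sep and key in wanted:
--             flags[key] = value
--     return flags
-- ===== Notes on version B (the rewrite author's own statement) =====
-- stated objective: alternative
-- what changed: B drops A's inner startswith-scan of expected_flags per line: it splits each line once at its first '=' and checks the key against a set of the expected flags built once, inserting in the same line order.
-- outside the precondition, e.g. on parse_output_flags('A=B=c', ['A=B']): A returns {'A=B': 'c'}, B returns {}
import Mathlib
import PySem

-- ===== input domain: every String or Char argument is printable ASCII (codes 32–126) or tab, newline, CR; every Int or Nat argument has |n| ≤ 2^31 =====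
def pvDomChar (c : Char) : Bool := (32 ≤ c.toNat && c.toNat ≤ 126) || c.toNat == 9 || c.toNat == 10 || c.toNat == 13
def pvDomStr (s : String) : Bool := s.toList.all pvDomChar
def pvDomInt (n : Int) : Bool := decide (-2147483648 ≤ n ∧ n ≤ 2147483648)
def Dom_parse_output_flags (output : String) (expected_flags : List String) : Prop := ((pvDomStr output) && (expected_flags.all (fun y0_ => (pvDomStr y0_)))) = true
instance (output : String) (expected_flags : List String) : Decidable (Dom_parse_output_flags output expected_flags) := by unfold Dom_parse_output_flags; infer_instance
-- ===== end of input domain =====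

-- B replaces A's inner scan of expected_flags per line by a single split of each line at its
-- first '=' plus one membership test in a set built once (objective: alternative decomposition).

-- ===== PORT A =====
-- inner 'for flag in expected_flags: … break' loop of A; removeprefix is exact here because
-- it is only taken in the branch where startswith has just succeeded (drop of the prefix length)
def pvAinner (line : List Char) (d : PySem.Dict String String) : List String → PySem.Dict String String
  | [] => d
  | flag :: rest =>
    if PySem.Chars.startswith line (flag.toList ++ ['=']) then
      d.insert flag (String.ofList (line.drop (flag.toList.length + 1)))
    else pvAinner line d rest

def parse_output_flags (output : String) (expected_flags : List String) : List (String × String) :=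
  ((PySem.Str.splitlines output).foldl
    (fun d line => pvAinner line.toList d expected_flags) PySem.Dict.empty).items

-- ===== PORT B =====
-- hand port of line.partition("="): none = no '=' in the line, some (key, value) otherwise
def pvPartitionEq : List Char → Option (List Char × List Char)
  | [] => none
  | c :: rest =>
    if c = '=' then some ([], rest)
    else match pvPartitionEq rest with
         | none => none
         | some (k, v) => some (c :: k, v)

def parse_output_flags_alt (output : String) (expected_flags : List String) : List (String × String) :=
  let wanted : PySem.Set String := PySem.Set.ofList expected_flags
  ((PySem.Str.splitlines output).foldl
    (fun d line =>
      match pvPartitionEq line.toList with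
      | none => d
      | some (k, v) =>
        if PySem.Set.contains wanted (String.ofList k) then
          d.insert (String.ofList k) (String.ofList v)
        else d)
    PySem.Dict.empty).items

-- ===== PRECONDITION & SPEC =====
-- Pre_ excludes only the inputs where an expected flag whose name itself contains '=' actually
-- matches a line (line starts with flag+"="): there A keys the result by the whole flag while a
-- KEY=VALUE parse keys by the text before the line's first '=' — a corner nobody would specify.
def Pre_parse_output_flags (output : String) (expected_flags : List String) : Prop :=
  ∀ f ∈ expected_flags, '=' ∈ f.toList →
    ∀ line ∈ PySem.Str.splitlines output,
      PySem.Chars.startswith line.toList (f.toList ++ ['=']) = false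
instance (output : String) (expected_flags : List String) : Decidable (Pre_parse_output_flags output expected_flags) := by unfold Pre_parse_output_flags; infer_instance

def pvWitness_parse_output_flags : String × List String :=
  ("LINUX_DISTRO=ubuntu\nC_LIB_VERSION=2.35", ["LINUX_DISTRO", "C_LIB_VERSION"])

def Spec_parse_output_flags (output : String) (expected_flags : List String) (out : List (String × String)) : Prop := out = parse_output_flags_alt output expected_flags
instance (output : String) (expected_flags : List String) (out : List (String × String)) : Decidable (Spec_parse_output_flags output expected_flags out) := by unfold Spec_parse_output_flags; infer_instance

-- ===== CLAIM (what is proved, stated in full; the proofs are below) =====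
def Claim_equal_parse_output_flags : Prop := ∀ (output : String) (expected_flags : List String), Dom_parse_output_flags output expected_flags → Pre_parse_output_flags output expected_flags → Spec_parse_output_flags output expected_flags (parse_output_flags output expected_flags)

-- ===== LEMMAS AND PROOFS =====

theorem pvPartition_none (l : List Char) : pvPartitionEq l = none ↔ '=' ∉ l := by
  induction l with
  | nil => simp [pvPartitionEq]
  | cons c rest ih =>
    by_cases hc : c = '='
    · subst hc; simp [pvPartitionEq]
    · simp only [pvPartitionEq, if_neg hc]
      cases hp : pvPartitionEq rest with
      | none =>
        simp only [List.mem_cons, not_or]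
        constructor
        · intro _; exact ⟨fun h => hc h.symm, ih.mp hp⟩
        · intro _; trivial
      | some kv =>
        obtain ⟨k, v⟩ := kv
        have hmem : '=' ∈ rest := by
          by_contra hmm
          rw [ih.mpr hmm] at hp; cases hp
        simp [List.mem_cons, hmem]

theorem pvPartition_some (l k v : List Char) (h : pvPartitionEq l = some (k, v)) :
    '=' ∉ k ∧ l = k ++ '=' :: v := by
  induction l generalizing k v with
  | nil => simp [pvPartitionEq] at h
  | cons c rest ih =>
    by_cases hc : c = '='
    · subst hc; simp [pvPartitionEq] at h
      obtain ⟨hk, hv⟩ := h; subst hk; subst hv; simp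
    · simp only [pvPartitionEq, if_neg hc] at h
      cases hp : pvPartitionEq rest with
      | none => rw [hp] at h; simp at h
      | some kv =>
        obtain ⟨k', v'⟩ := kv
        rw [hp] at h; simp at h
        obtain ⟨hk, hv⟩ := h
        obtain ⟨hnk, hl⟩ := ih k' v' hp
        subst hk; subst hv
        constructor
        · simp only [List.mem_cons, not_or]
          exact ⟨fun h => hc h.symm, hnk⟩
        · simp [hl]

theorem pvPrefix_eq (p : List Char) (v : List Char) :
    ∀ k : List Char, '=' ∉ p → '=' ∉ k → ((p ++ ['=']) <+: (k ++ '=' :: v) ↔ p = k) := by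
  induction p with
  | nil =>
    intro k _ hk
    cases k with
    | nil => simp
    | cons b k' =>
      have hb : b ≠ '=' := fun h => hk (by simp [h])
      simp only [List.nil_append, List.cons_append]
      constructor
      · intro h
        exact absurd (List.cons_prefix_cons.mp h).1 (fun he => hb he.symm)
      · intro h; cases h
  | cons a p' ih =>
    intro k hp hk
    cases k with
    | nil =>
      have ha : a ≠ '=' := fun h => hp (by simp [h])
      simp only [List.cons_append, List.nil_append]
      constructor
      · intro h
        exact absurd (List.cons_prefix_cons.mp h).1 ha
      · intro h; cases h
    | cons b k' =>
      have hp' : '=' ∉ p' := fun h => hp (by simp [h])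
      have hk' : '=' ∉ k' := fun h => hk (by simp [h])
      simp only [List.cons_append]
      rw [List.cons_prefix_cons]
      constructor
      · rintro ⟨rfl, h2⟩
        rw [(ih k' hp' hk').mp h2]
      · intro h
        obtain ⟨h1, h2⟩ := List.cons_eq_cons.mp h
        exact ⟨h1, (ih k' hp' hk').mpr h2⟩

theorem pvOfList_inj (f : String) (k : List Char) (h : f.toList = k) : f = String.ofList k := by
  rw [← h]; exact (by simp : String.ofList f.toList = f).symm

theorem pvStep_eq (line : List Char) (d : PySem.Dict String String) :
    ∀ flags : List String,
    (∀ f ∈ flags, '=' ∈ f.toList → PySem.Chars.startswith line (f.toList ++ ['=']) = false) →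
    pvAinner line d flags =
      (match pvPartitionEq line with
       | none => d
       | some (k, v) =>
         if flags.contains (String.ofList k) then
           d.insert (String.ofList k) (String.ofList v)
         else d) := by
  intro flags
  induction flags with
  | nil =>
    intro _
    cases hp : pvPartitionEq line <;> simp [pvAinner]
  | cons f rest ih =>
    intro h
    have hrest : ∀ g ∈ rest, '=' ∈ g.toList → PySem.Chars.startswith line (g.toList ++ ['=']) = false :=
      fun g hg => h g (by simp [hg])
    cases hp : pvPartitionEq line with
    | none =>
      have hne : '=' ∉ line := (pvPartition_none line).mp hp
      have hsw : PySem.Chars.startswith line (f.toList ++ ['=']) = false := by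
        rw [Bool.eq_false_iff]
        intro hc
        exact hne (((PySem.Chars.startswith_iff line (f.toList ++ ['='])).mp hc).subset (by simp))
      rw [pvAinner, if_neg (by simp [hsw])]
      have := ih hrest
      rw [hp] at this
      simp [this]
    | some kv =>
      obtain ⟨k, v⟩ := kv
      obtain ⟨hk, hl⟩ := pvPartition_some line k v hp
      by_cases hsw : PySem.Chars.startswith line (f.toList ++ ['=']) = true
      · have hf : '=' ∉ f.toList := by
          by_contra hin
          rw [h f (by simp) hin] at hsw
          cases hsw
        have hfk : f.toList = k := by
          have := (PySem.Chars.startswith_iff line (f.toList ++ ['='])).mp hsw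
          rw [hl] at this
          exact (pvPrefix_eq f.toList v k hf hk).mp this
        have hfk' : f = String.ofList k := pvOfList_inj f k hfk
        rw [pvAinner, if_pos hsw]
        have hdrop : line.drop (f.toList.length + 1) = v := by
          rw [hl, hfk]
          simpa using List.drop_append (l₁ := k) (l₂ := '=' :: v) (i := 1)
        rw [hdrop]
        simp [hfk']
      · rw [pvAinner, if_neg hsw]
        have := ih hrest
        rw [hp] at this
        rw [this]
        have hne : (String.ofList k = f) = False := by
          apply eq_false
          intro he
          have hfk : f.toList = k := by rw [← he]; simp
          have hf : '=' ∉ f.toList := by rw [hfk]; exact hk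
          exact hsw ((PySem.Chars.startswith_iff line (f.toList ++ ['='])).mpr
            (by rw [hl]; exact (pvPrefix_eq f.toList v k hf hk).mpr hfk))
        simp [hne]

-- ===== VERDICT (by name: the statement is the Claim_ definition above) =====
theorem parse_output_flags_spec : Claim_equal_parse_output_flags := by
  intro output flags _ hpre
  unfold Spec_parse_output_flags parse_output_flags parse_output_flags_alt
  congr 1
  apply PySem.List.foldl_congr_mem
  intro d line hline
  rw [pvStep_eq line.toList d flags (fun f hf hin => hpre f hf hin line hline)]
  cases hp : pvPartitionEq line.toList <;> simp
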